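-- pv_equiv track=rewrite | github.com/vantisCorp/V-AGI | v-agi/src/agents/vita.py | _generate_interaction_recommendations
-- ===== SOURCE A (Python) =====
-- from typing import Dict, List, Optional, Any
--
-- def _generate_interaction_recommendations(interactions: List[Dict[str, Any]]) -> List[str]:
--     """Generate recommendations based on interactions."""
--     recommendations = []
--
--     high_severity = [i for i in interactions if i["severity"] == "high"]
--     moderate_severity = [i for i in interactions if i["severity"] == "moderate"]
--
--     if high_severity:
--         recommendations.append("URGENT: Review high-severity interactions with healthcare provider")
--         for interaction in high_severity:
--             recommendations.append(interaction["recommendation"])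
--
--     if moderate_severity:
--         recommendations.append("Monitor for adverse effects from moderate-severity interactions")
--         for interaction in moderate_severity:
--             recommendations.append(interaction["recommendation"])
--
--     if not interactions:
--         recommendations.append("No known drug interactions detected")
--
--     return recommendations
-- ===== SOURCE B (Python) =====
-- def _generate_interaction_recommendations(interactions):
--     """Generate recommendations based on interactions.
--
--     Tag each relevant interaction with a severity rank, stable-sort by rank,
--     then emit in one scan, inserting the matching header whenever the rank changes.
--     """
--     rank = {"high": 0, "moderate": 1}
--     headers = [
--         "URGENT: Review high-severity interactions with healthcare provider",
--         "Monitor for adverse effects from moderate-severity interactions",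
--     ]
--     tagged = [(rank[i["severity"]], i["recommendation"])
--               for i in interactions if i["severity"] in rank]
--     tagged.sort(key=lambda t: t[0])
--
--     out = []
--     prev = None
--     for r, rec in tagged:
--         if r != prev:
--             out.append(headers[r])
--             prev = r
--         out.append(rec)
--     if not interactions:
--         out.append("No known drug interactions detected")
--     return out
-- ===== Notes on version B (the rewrite author's own statement) =====
-- stated objective: alternative
-- what changed: A partitions by two severity-filtering comprehensions and emits each group behind its header; B tags relevant interactions with a numeric severity rank, stable-sorts by that rank, and emits everything in one scan that inserts the matching header whenever the rank changes.
import Mathlib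
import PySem

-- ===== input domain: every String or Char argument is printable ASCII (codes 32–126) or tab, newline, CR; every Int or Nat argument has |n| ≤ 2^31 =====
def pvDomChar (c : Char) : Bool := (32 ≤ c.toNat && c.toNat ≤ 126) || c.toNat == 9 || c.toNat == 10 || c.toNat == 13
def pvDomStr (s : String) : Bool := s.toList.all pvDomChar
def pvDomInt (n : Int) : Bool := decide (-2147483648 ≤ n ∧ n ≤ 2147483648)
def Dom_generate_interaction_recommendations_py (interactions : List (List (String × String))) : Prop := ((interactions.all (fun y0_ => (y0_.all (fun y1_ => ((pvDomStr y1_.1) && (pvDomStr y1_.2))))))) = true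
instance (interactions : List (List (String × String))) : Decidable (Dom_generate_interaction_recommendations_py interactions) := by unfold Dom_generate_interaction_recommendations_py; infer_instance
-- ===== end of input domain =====

-- B replaces A's two severity-filter passes by tag-with-rank, stable sort by rank, and a single
-- header-on-rank-change emit scan; return values agree on Pre_.
-- dict lookup i[k] (first match in the association list); none = KeyError, excluded by Pre_ below
def pvLookup (i : List (String × String)) (k : String) : Option String :=
  (PySem.Dict.mk i).get? k

-- ===== PORT A =====
def generate_interaction_recommendations_py (interactions : List (List (String × String))) : List String :=
  let high_severity := interactions.filter (fun i => (pvLookup i "severity").getD "" == "high")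
  let moderate_severity := interactions.filter (fun i => (pvLookup i "severity").getD "" == "moderate")
  (if high_severity.isEmpty then []
   else "URGENT: Review high-severity interactions with healthcare provider" ::
        high_severity.map (fun i => (pvLookup i "recommendation").getD ""))
  ++ (if moderate_severity.isEmpty then []
      else "Monitor for adverse effects from moderate-severity interactions" ::
           moderate_severity.map (fun i => (pvLookup i "recommendation").getD ""))
  ++ (if interactions.isEmpty then ["No known drug interactions detected"] else [])

-- ===== PORT B =====
-- the rank dict and headers list of Source B
def pvRank : PySem.Dict String Nat := PySem.Dict.mk [("high", 0), ("moderate", 1)]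
def pvHeaders : List String :=
  ["URGENT: Review high-severity interactions with healthcare provider",
   "Monitor for adverse effects from moderate-severity interactions"]

-- one step of Source B's emit loop; state = (out, prev)
def pvEmitStep (st : List String × Option Nat) (t : Nat × String) : List String × Option Nat :=
  let st' := if st.2 ≠ some t.1
             then (st.1 ++ [(PySem.List.pyGet? pvHeaders (t.1 : Int)).getD ""], some t.1)
             else st
  (st'.1 ++ [t.2], st'.2)

def generate_interaction_recommendations_py_alt (interactions : List (List (String × String))) : List String :=
  let tagged :=
    (interactions.filter (fun i => (pvRank.get? ((pvLookup i "severity").getD "")).isSome)).map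
      (fun i => ((pvRank.get? ((pvLookup i "severity").getD "")).getD 0,
                 (pvLookup i "recommendation").getD ""))
  let sortedTagged := PySem.List.sorted tagged (fun t => t.1) false
  let st := sortedTagged.foldl pvEmitStep ([], none)
  st.1 ++ (if interactions.isEmpty then ["No known drug interactions detected"] else [])

-- ===== PRECONDITION & SPEC =====
-- Pre_ excludes exactly the inputs on which the Python raises KeyError: an interaction without a
-- "severity" key, or a high/moderate interaction without a "recommendation" key.
def Pre_generate_interaction_recommendations_py (interactions : List (List (String × String))) : Prop :=
  ∀ i ∈ interactions, (pvLookup i "severity").isSome ∧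
    (((pvLookup i "severity").getD "" = "high" ∨ (pvLookup i "severity").getD "" = "moderate") →
      (pvLookup i "recommendation").isSome)
instance (interactions : List (List (String × String))) : Decidable (Pre_generate_interaction_recommendations_py interactions) := by unfold Pre_generate_interaction_recommendations_py; infer_instance
def pvWitness_generate_interaction_recommendations_py : (List (List (String × String))) :=
  [[("severity", "high"), ("recommendation", "Avoid this combination")],
   [("severity", "low"), ("recommendation", "none")]]
def Spec_generate_interaction_recommendations_py (interactions : List (List (String × String))) (out : List String) : Prop := out = generate_interaction_recommendations_py_alt interactions
instance (interactions : List (List (String × String))) (out : List String) : Decidable (Spec_generate_interaction_recommendations_py interactions out) := by unfold Spec_generate_interaction_recommendations_py; infer_instance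

-- ===== CLAIM (what is proved, stated in full; the proofs are below) =====
def Claim_equal_generate_interaction_recommendations_py : Prop := ∀ (interactions : List (List (String × String))), Dom_generate_interaction_recommendations_py interactions → Pre_generate_interaction_recommendations_py interactions → Spec_generate_interaction_recommendations_py interactions (generate_interaction_recommendations_py interactions)

-- ===== LEMMAS AND PROOFS =====

-- insertBy passes over a prefix it does not go before
theorem pvInsertBy_skip {α : Type} (before : α → α → Bool) (x : α) (as bs : List α)
    (h : ∀ a ∈ as, before x a = false) :
    PySem.List.insertBy before x (as ++ bs) = as ++ PySem.List.insertBy before x bs := by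
  induction as with
  | nil => simp
  | cons a as ih =>
    have ha : before x a = false := h a (by simp)
    simp [PySem.List.insertBy, ha, ih (fun a ha' => h a (by simp [ha']))]

theorem pvInsertBy_head {α : Type} (before : α → α → Bool) (x b : α) (bs : List α)
    (h : before x b = true) :
    PySem.List.insertBy before x (b :: bs) = x :: b :: bs := by
  simp [PySem.List.insertBy, h]

-- the insertion-sort fold over {0,1}-ranked items keeps the two groups separated, in input order
theorem pvFoldIns (xs : List (Nat × String)) (a0 a1 : List (Nat × String))
    (h0 : ∀ t ∈ a0, t.1 = 0) (h1 : ∀ t ∈ a1, t.1 = 1) (hx : ∀ t ∈ xs, t.1 = 0 ∨ t.1 = 1) :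
    xs.foldl (fun acc x => PySem.List.insertBy (fun a b => decide (a.1 < b.1)) x acc) (a0 ++ a1)
      = (a0 ++ xs.filter (fun t => t.1 == 0)) ++ (a1 ++ xs.filter (fun t => t.1 == 1)) := by
  induction xs generalizing a0 a1 with
  | nil => simp
  | cons x xs ih =>
    have hxs : ∀ t ∈ xs, t.1 = 0 ∨ t.1 = 1 := fun t ht => hx t (by simp [ht])
    rcases hx x (by simp) with hk | hk
    · have hskip : ∀ a ∈ a0, (fun a b => decide (a.1 < b.1)) x a = false := by
        intro a ha; simp [h0 a ha, hk]
      have hins : PySem.List.insertBy (fun a b => decide (a.1 < b.1)) x a1 = x :: a1 := by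
        cases a1 with
        | nil => simp [PySem.List.insertBy]
        | cons b bs =>
          exact pvInsertBy_head _ _ _ _ (by simp [h1 b (by simp), hk])
      have h0' : ∀ t ∈ a0 ++ [x], t.1 = 0 := by
        intro t ht
        rcases List.mem_append.1 ht with h | h
        · exact h0 t h
        · simp at h; simp [h, hk]
      rw [List.foldl_cons, pvInsertBy_skip _ _ _ _ hskip, hins,
          show a0 ++ x :: a1 = (a0 ++ [x]) ++ a1 by simp,
          ih (a0 ++ [x]) a1 h0' h1 hxs]
      simp [hk]
    · have hskip : ∀ a ∈ a0 ++ a1, (fun a b => decide (a.1 < b.1)) x a = false := by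
        intro a ha
        rcases List.mem_append.1 ha with h | h
        · simp [h0 a h, hk]
        · simp [h1 a h, hk]
      have h1' : ∀ t ∈ a1 ++ [x], t.1 = 1 := by
        intro t ht
        rcases List.mem_append.1 ht with h | h
        · exact h1 t h
        · simp at h; simp [h, hk]
      rw [List.foldl_cons, PySem.List.insertBy_of_forall_not_before _ _ _ hskip,
          show (a0 ++ a1) ++ [x] = a0 ++ (a1 ++ [x]) by simp,
          ih a0 (a1 ++ [x]) h0 h1' hxs]
      simp [hk]

-- the stable sort of {0,1}-ranked items is the 0-group followed by the 1-group, each in input order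
theorem pvSort01 (xs : List (Nat × String)) (hx : ∀ t ∈ xs, t.1 = 0 ∨ t.1 = 1) :
    PySem.List.sorted xs (fun t => t.1) false
      = xs.filter (fun t => t.1 == 0) ++ xs.filter (fun t => t.1 == 1) := by
  rw [PySem.List.sorted_eq_foldl_insertBy]
  have := pvFoldIns xs [] [] (by simp) (by simp) hx
  simpa using this

-- the emit loop over a constant-rank run only appends the recommendations
theorem pvEmitConst (ts : List (Nat × String)) (out : List String) (k : Nat)
    (h : ∀ t ∈ ts, t.1 = k) :
    ts.foldl pvEmitStep (out, some k) = (out ++ ts.map (fun t => t.2), some k) := by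
  induction ts generalizing out with
  | nil => simp
  | cons t ts ih =>
    have hk : t.1 = k := h t (by simp)
    rw [List.foldl_cons, show pvEmitStep (out, some k) t = (out ++ [t.2], some k) by
          simp [pvEmitStep, hk]]
    rw [ih (out ++ [t.2]) (fun t ht => h t (by simp [ht]))]
    simp

-- a maximal constant-rank run starting at a different prev: header, then the recommendations
theorem pvEmitRunCons (t : Nat × String) (ts : List (Nat × String)) (out : List String)
    (p : Option Nat) (hp : p ≠ some t.1) (h : ∀ u ∈ ts, u.1 = t.1) :
    (t :: ts).foldl pvEmitStep (out, p)
      = (out ++ [(PySem.List.pyGet? pvHeaders (t.1 : Int)).getD ""] ++ [t.2]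
          ++ ts.map (fun u => u.2), some t.1) := by
  rw [List.foldl_cons, show pvEmitStep (out, p) t
        = (out ++ [(PySem.List.pyGet? pvHeaders (t.1 : Int)).getD ""] ++ [t.2], some t.1) by
          simp [pvEmitStep, hp],
      pvEmitConst ts _ _ h]

-- the emit loop over the sorted 0-run ++ 1-run produces header₀-group₀ then header₁-group₁
theorem pvEmitRuns (zs os : List (Nat × String))
    (hz : ∀ t ∈ zs, t.1 = 0) (ho : ∀ t ∈ os, t.1 = 1) :
    ((zs ++ os).foldl pvEmitStep ([], none)).1
      = (if zs.isEmpty then []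
         else "URGENT: Review high-severity interactions with healthcare provider"
                :: zs.map (fun t => t.2))
        ++ (if os.isEmpty then []
            else "Monitor for adverse effects from moderate-severity interactions"
                :: os.map (fun t => t.2)) := by
  have hh0 : (PySem.List.pyGet? pvHeaders (0 : Int)).getD ""
      = "URGENT: Review high-severity interactions with healthcare provider" := by decide
  have hh1 : (PySem.List.pyGet? pvHeaders (1 : Int)).getD ""
      = "Monitor for adverse effects from moderate-severity interactions" := by decide
  cases zs with
  | nil =>
    cases os with
    | nil => simp
    | cons o os' =>
      have ho1 : o.1 = 1 := ho o (by simp)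
      rw [List.nil_append, pvEmitRunCons o os' [] none (by simp)
            (fun u hu => (ho u (by simp [hu])).trans ho1.symm)]
      simp [ho1, hh1]
  | cons z zs' =>
    have hz0 : z.1 = 0 := hz z (by simp)
    have hrun : (z :: zs').foldl pvEmitStep ([], none)
        = ([(PySem.List.pyGet? pvHeaders ((z.1 : Nat) : Int)).getD ""] ++ [z.2]
            ++ zs'.map (fun u => u.2), some z.1) := by
      have := pvEmitRunCons z zs' [] none (by simp)
          (fun u hu => (hz u (by simp [hu])).trans hz0.symm)
      simpa using this
    rw [List.foldl_append, hrun]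
    cases os with
    | nil => simp [hz0, hh0]
    | cons o os' =>
      have ho1 : o.1 = 1 := ho o (by simp)
      rw [pvEmitRunCons o os' _ (some z.1) (by simp [hz0, ho1])
            (fun u hu => (ho u (by simp [hu])).trans ho1.symm)]
      simp [hz0, ho1, hh0, hh1]

-- the rank dict of Source B, as a conditional
theorem pvRank_get (s : String) :
    pvRank.get? s = if s = "high" then some 0 else if s = "moderate" then some 1 else none := by
  by_cases h1 : s = "high"
  · subst h1; decide
  · by_cases h2 : s = "moderate"
    · subst h2; simp [h1]; decide
    · simp only [h1, h2, if_false]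
      simp [pvRank, PySem.Dict.get?]
      exact ⟨fun h => h1 h.symm, fun h => h2 h.symm⟩

-- ===== VERDICT (by name: the statement is the Claim_ definition above) =====
theorem generate_interaction_recommendations_py_spec : Claim_equal_generate_interaction_recommendations_py := by
  intro interactions _ _
  unfold Spec_generate_interaction_recommendations_py
  simp only [generate_interaction_recommendations_py, generate_interaction_recommendations_py_alt]
  have htag : ∀ t ∈ (interactions.filter
        (fun i => (pvRank.get? ((pvLookup i "severity").getD "")).isSome)).map
        (fun i => ((pvRank.get? ((pvLookup i "severity").getD "")).getD 0,
                   (pvLookup i "recommendation").getD "")),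
      t.1 = 0 ∨ t.1 = 1 := by
    intro t ht
    rcases List.mem_map.1 ht with ⟨i, hi, rfl⟩
    by_cases h1 : (pvLookup i "severity").getD "" = "high"
    · simp [pvRank_get, h1]
    · by_cases h2 : (pvLookup i "severity").getD "" = "moderate" <;>
        simp [pvRank_get, h1, h2]
  rw [pvSort01 _ htag]
  rw [List.filter_map, List.filter_map]
  simp only [Function.comp_def]
  rw [List.filter_filter, List.filter_filter]
  have hpred0 : ∀ i ∈ interactions,
      (((pvRank.get? ((pvLookup i "severity").getD "")).getD 0 == 0)
        && (pvRank.get? ((pvLookup i "severity").getD "")).isSome)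
      = ((pvLookup i "severity").getD "" == "high") := by
    intro i _
    by_cases h1 : (pvLookup i "severity").getD "" = "high"
    · simp [pvRank_get, h1]
    · by_cases h2 : (pvLookup i "severity").getD "" = "moderate" <;>
        simp [pvRank_get, h1, h2]
  have hpred1 : ∀ i ∈ interactions,
      (((pvRank.get? ((pvLookup i "severity").getD "")).getD 0 == 1)
        && (pvRank.get? ((pvLookup i "severity").getD "")).isSome)
      = ((pvLookup i "severity").getD "" == "moderate") := by
    intro i _
    by_cases h1 : (pvLookup i "severity").getD "" = "high"
    · simp [pvRank_get, h1]
    · by_cases h2 : (pvLookup i "severity").getD "" = "moderate" <;>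
        simp [pvRank_get, h1, h2]
  rw [List.filter_congr hpred0, List.filter_congr hpred1]
  rw [pvEmitRuns]
  · simp [List.map_map, Function.comp_def]
  · intro t ht
    rcases List.mem_map.1 ht with ⟨i, hi, rfl⟩
    have hm := List.of_mem_filter hi
    simp at hm
    simp [pvRank_get, hm]
  · intro t ht
    rcases List.mem_map.1 ht with ⟨i, hi, rfl⟩
    have hm := List.of_mem_filter hi
    simp at hm
    simp [pvRank_get, hm]
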